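-- pv_equiv track=rewrite | github.com/gabeorlanski/simple-code-execution | code_execution/processors/python/percent_passed.py | _make_test_runner
-- ===== SOURCE A (Python) =====
-- import ast
--
-- RUNNER_TEMPLATE = """def run_tests(test_timeout:Optional[int]=None):
--     from {solution_module} import {entry_point}"""
--
-- def _make_test_runner(
--     num_test_cases: int,
--     module_name: str,
--     entry_point: str,
-- ):
--     tree = ast.parse(
--         RUNNER_TEMPLATE.format(
--             solution_module=module_name, entry_point=entry_point
--         )
--     )
--
--     test_calls = [
--         ast.Expr(
--             value=ast.Call(
--                 func=ast.Name(id=f"test_{idx}", ctx=ast.Load()),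
--                 args=[ast.Name(id=entry_point, ctx=ast.Load())],
--                 keywords=[
--                     ast.keyword(
--                         arg="test_timeout",
--                         value=ast.Name(id="test_timeout", ctx=ast.Load()),
--                     ),
--                 ],
--             )
--         )
--         for idx in range(num_test_cases)
--     ]
--
--     tree.body[0].body += test_calls
--     tree.body = list(map(ast.fix_missing_locations, tree.body))
--     return ast.unparse(tree)
-- ===== SOURCE B (Python) =====
-- def _make_test_runner(
--     num_test_cases: int,
--     module_name: str,
--     entry_point: str,
-- ):
--     lines = [
--         "def run_tests(test_timeout: Optional[int]=None):",
--         f"    from {module_name} import {entry_point}",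
--     ]
--     for idx in range(num_test_cases):
--         lines.append(f"    test_{idx}({entry_point}, test_timeout=test_timeout)")
--     return "\n".join(lines)
-- ===== Notes on version B (the rewrite author's own statement) =====
-- stated objective: simpler
-- what changed: B drops the AST round-trip (ast.parse of a template, building Call nodes, fix_missing_locations, ast.unparse) and emits the runner source directly as a list of f-string lines joined with newlines.
import Mathlib
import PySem

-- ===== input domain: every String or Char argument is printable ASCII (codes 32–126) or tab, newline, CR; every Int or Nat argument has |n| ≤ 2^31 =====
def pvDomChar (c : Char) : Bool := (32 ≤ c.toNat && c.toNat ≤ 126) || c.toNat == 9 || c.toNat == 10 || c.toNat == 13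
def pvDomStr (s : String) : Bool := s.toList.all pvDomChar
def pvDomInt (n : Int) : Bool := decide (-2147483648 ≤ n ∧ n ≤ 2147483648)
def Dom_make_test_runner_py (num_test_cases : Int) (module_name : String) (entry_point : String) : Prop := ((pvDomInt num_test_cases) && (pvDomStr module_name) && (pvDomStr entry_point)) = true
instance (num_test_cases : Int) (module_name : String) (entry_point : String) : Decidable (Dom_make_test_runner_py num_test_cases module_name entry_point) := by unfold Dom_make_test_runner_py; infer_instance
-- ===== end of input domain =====

-- ===== PORT A =====
-- B replaces A's ast.parse/build/unparse round-trip by direct f-string line assembly (simpler).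
-- A mini-AST covering exactly the node shapes A's code creates (ImportFrom from the parsed
-- template; Expr(Call(Name, [Name], [keyword=Name])) test calls); pvAstParseTemplate models
-- ast.parse(RUNNER_TEMPLATE.format(...)) -- exact when module_name is a dotted identifier path
-- and entry_point an identifier (Pre_), where parsing keeps both strings verbatim.
inductive PyStmt : Type
  | importFrom : String → String → PyStmt                    -- from <module> import <name>
  | exprCall : String → String → String → String → PyStmt    -- <f>(<arg>, <kw>=<kwval>)

structure PyFunctionDef : Type where
  name : String
  argName : String
  annOuter : String
  annInner : String
  defaultVal : String
  body : List PyStmt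

def pvAstParseTemplate (module_name entry_point : String) : PyFunctionDef :=
  { name := "run_tests", argName := "test_timeout", annOuter := "Optional", annInner := "int",
    defaultVal := "None", body := [PyStmt.importFrom module_name entry_point] }

-- ast.unparse of one statement node of the shapes above
def pvUnparseStmt : PyStmt → String
  | PyStmt.importFrom m n => "from " ++ m ++ " import " ++ n
  | PyStmt.exprCall f a kw kv => f ++ "(" ++ a ++ ", " ++ kw ++ "=" ++ kv ++ ")"

-- ast.unparse's rendering of a function body: each statement on its own line, indented 4
def pvBodyBlock : List PyStmt → String
  | [] => ""
  | s :: rest => "\n    " ++ pvUnparseStmt s ++ pvBodyBlock rest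

def pvUnparseFn (fd : PyFunctionDef) : String :=
  "def " ++ fd.name ++ "(" ++ fd.argName ++ ": " ++ fd.annOuter ++ "[" ++ fd.annInner ++
    "]=" ++ fd.defaultVal ++ "):" ++ pvBodyBlock fd.body

def make_test_runner_py (num_test_cases : Int) (module_name : String) (entry_point : String) : String :=
  let tree := pvAstParseTemplate module_name entry_point
  let test_calls : List PyStmt :=
    (PySem.List.pyRange 0 num_test_cases 1).map (fun idx =>
      PyStmt.exprCall ("test_" ++ PySem.Int.toStr idx) entry_point "test_timeout" "test_timeout")
  let tree := { tree with body := tree.body ++ test_calls }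
  pvUnparseFn tree

-- ===== PORT B =====
def make_test_runner_py_alt (num_test_cases : Int) (module_name : String) (entry_point : String) : String :=
  let lines : List String :=
    ["def run_tests(test_timeout: Optional[int]=None):",
     "    from " ++ module_name ++ " import " ++ entry_point] ++
    (PySem.List.pyRange 0 num_test_cases 1).map (fun idx =>
      "    test_" ++ PySem.Int.toStr idx ++ "(" ++ entry_point ++ ", test_timeout=test_timeout)")
  PySem.Str.join "\n" lines

-- ===== PRECONDITION & SPEC =====
def pvPyKeywords : List String :=
  ["False", "None", "True", "and", "as", "assert", "async", "await", "break", "class",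
   "continue", "def", "del", "elif", "else", "except", "finally", "for", "from", "global",
   "if", "import", "in", "is", "lambda", "nonlocal", "not", "or", "pass", "raise",
   "return", "try", "while", "with", "yield"]

def pvIsIdentChars (cs : List Char) : Bool :=
  (match cs with
   | [] => false
   | c :: rest => (c.isAlpha || c == '_') && rest.all (fun d => d.isAlphanum || d == '_')) &&
  !((pvPyKeywords.map String.toList).contains cs)

-- one import item in ast.unparse's canonical spelling: "name" or "name as name"
def pvIsImportItemChars (cs : List Char) : Bool :=
  match cs.splitOn ' ' with
  | [a] => pvIsIdentChars a
  | [a, w, b] => pvIsIdentChars a && w == ['a', 's'] && pvIsIdentChars b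
  | _ => false

-- the whole import-names text in canonical spelling: "*" or items joined by ", "
def pvIsImportListChars (cs : List Char) : Bool :=
  cs == ['*'] ||
  (match cs.splitOn ',' with
   | [] => false
   | p :: ps =>
       pvIsImportItemChars p &&
       ps.all (fun q => match q with
                        | ' ' :: r => pvIsImportItemChars r
                        | _ => false))

-- Pre_ excludes inputs where A's ast.parse raises SyntaxError (text that is not valid in the
-- 'from … import …' line), and the parse-accepted strings whose spelling is not the canonical
-- one ast.unparse re-emits (padding whitespace, spaces around dots, 'a,b' without the space):
-- there A's value is whatever the parse/unparse round-trip normalizes to -- a spelling no one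
-- would specify -- while B splices the strings verbatim.
def Pre_make_test_runner_py (num_test_cases : Int) (module_name : String) (entry_point : String) : Prop :=
  ((module_name.toList.splitOn '.').all pvIsIdentChars &&
    pvIsImportListChars entry_point.toList) = true
instance (num_test_cases : Int) (module_name : String) (entry_point : String) : Decidable (Pre_make_test_runner_py num_test_cases module_name entry_point) := by unfold Pre_make_test_runner_py; infer_instance

def pvWitness_make_test_runner_py : Int × String × String := (2, "my_mod.sub", "entry_fn")

def Spec_make_test_runner_py (num_test_cases : Int) (module_name : String) (entry_point : String) (out : String) : Prop := out = make_test_runner_py_alt num_test_cases module_name entry_point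
instance (num_test_cases : Int) (module_name : String) (entry_point : String) (out : String) : Decidable (Spec_make_test_runner_py num_test_cases module_name entry_point out) := by unfold Spec_make_test_runner_py; infer_instance

-- ===== CLAIM (what is proved, stated in full; the proofs are below) =====
def Claim_equal_make_test_runner_py : Prop := ∀ (num_test_cases : Int) (module_name : String) (entry_point : String), Dom_make_test_runner_py num_test_cases module_name entry_point → Pre_make_test_runner_py num_test_cases module_name entry_point → Spec_make_test_runner_py num_test_cases module_name entry_point (make_test_runner_py num_test_cases module_name entry_point)

-- ===== LEMMAS AND PROOFS =====

-- Chars.join with "\n" on a nonempty list = head ++ each tail element prefixed by '\n'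
lemma pv_join_cons (x : List Char) (ys : List (List Char)) :
    PySem.Chars.join "\n".toList (x :: ys) = x ++ (ys.map (fun y => '\n' :: y)).flatten := by
  induction ys generalizing x with
  | nil => simp [PySem.Chars.join, List.intercalate]
  | cons y ys ih =>
      rw [PySem.Chars.join_cons_cons, ih y]
      simp

lemma pv_bodyBlock_toList (stmts : List PyStmt) :
    (pvBodyBlock stmts).toList =
      (stmts.map (fun s => '\n' :: (("    " ++ pvUnparseStmt s).toList))).flatten := by
  induction stmts with
  | nil => simp [pvBodyBlock]
  | cons s rest ih =>
      simp only [pvBodyBlock, String.toList_append, ih, List.map_cons, List.flatten_cons]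
      simp

theorem pv_equal : ∀ (num_test_cases : Int) (module_name : String) (entry_point : String),
    make_test_runner_py num_test_cases module_name entry_point =
      make_test_runner_py_alt num_test_cases module_name entry_point := by
  intro n m e
  apply String.toList_inj.mp
  simp only [make_test_runner_py, make_test_runner_py_alt, pvUnparseFn, pvAstParseTemplate,
    PySem.Str.join, List.cons_append, List.nil_append, List.map_cons, List.map_map]
  rw [String.toList_ofList, pv_join_cons]
  simp only [String.toList_append, pv_bodyBlock_toList, List.map_cons, List.map_map,
    List.flatten_cons, Function.comp_def, pvUnparseStmt]
  simp [List.append_assoc]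

-- ===== VERDICT (by name: the statement is the Claim_ definition above) =====
theorem make_test_runner_py_spec : Claim_equal_make_test_runner_py := by
  intro n m e _ _
  unfold Spec_make_test_runner_py
  exact pv_equal n m e
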